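-- pv_equiv track=rewrite | github.com/Nic0Byte/wall-build-1 | exporters/dxf_exporter.py | _optimize_cutting_layout
-- ===== SOURCE A (Python) =====
-- from typing import Dict, List, Optional, Tuple
--
-- def _optimize_cutting_layout(customs: List[Dict]) -> List[List[int]]:
--     """
--     Ottimizza il layout di taglio raggruppando pezzi simili.
--     Returns: Lista di righe, ogni riga contiene indici dei pezzi.
--     """
--     if not customs:
--         return []
--
--     # Ordina pezzi per altezza decrescente, poi larghezza
--     sorted_indices = sorted(
--         range(len(customs)),
--         key=lambda i: (-customs[i]['height'], -customs[i]['width'])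
--     )
--
--     # Raggruppa in righe di altezza simile
--     rows = []
--     current_row = []
--     current_row_height = None
--     height_tolerance = 50  # mm
--
--     for idx in sorted_indices:
--         piece_height = customs[idx]['height']
--
--         if (current_row_height is None or
--             abs(piece_height - current_row_height) <= height_tolerance):
--             current_row.append(idx)
--             current_row_height = piece_height
--         else:
--             if current_row:
--                 rows.append(current_row)
--             current_row = [idx]
--             current_row_height = piece_height
--
--     if current_row:
--         rows.append(current_row)
--
--     return rows
-- ===== SOURCE B (Python) =====
-- def _optimize_cutting_layout(customs):
--     """Staged passes: sort indices, list the sorted heights, compute all cut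
--     positions (where adjacent heights differ by more than 50 mm) with a
--     comprehension, then slice the sorted index list between consecutive cuts.
--     No stateful grouping loop: breaks are found first, rows are slices."""
--     n = len(customs)
--     order = sorted(
--         range(n),
--         key=lambda i: (-customs[i]['height'], -customs[i]['width'])
--     )
--     hs = [customs[i]['height'] for i in order]
--     cuts = [0] + [i for i in range(1, n) if abs(hs[i] - hs[i - 1]) > 50] + [n]
--     return [order[a:b] for a, b in zip(cuts, cuts[1:]) if a < b]
-- ===== Notes on version B (the rewrite author's own statement) =====
-- stated objective: alternative
-- what changed: Replaces A's single stateful accumulating loop (current row, current height, flush) with staged passes: first compute the list of cut positions where adjacent sorted heights differ by more than 50 via a comprehension, then produce the rows by slicing the sorted index list between consecutive cut positions (zip of cuts with its tail); no grouping state is maintained.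
import Mathlib
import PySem

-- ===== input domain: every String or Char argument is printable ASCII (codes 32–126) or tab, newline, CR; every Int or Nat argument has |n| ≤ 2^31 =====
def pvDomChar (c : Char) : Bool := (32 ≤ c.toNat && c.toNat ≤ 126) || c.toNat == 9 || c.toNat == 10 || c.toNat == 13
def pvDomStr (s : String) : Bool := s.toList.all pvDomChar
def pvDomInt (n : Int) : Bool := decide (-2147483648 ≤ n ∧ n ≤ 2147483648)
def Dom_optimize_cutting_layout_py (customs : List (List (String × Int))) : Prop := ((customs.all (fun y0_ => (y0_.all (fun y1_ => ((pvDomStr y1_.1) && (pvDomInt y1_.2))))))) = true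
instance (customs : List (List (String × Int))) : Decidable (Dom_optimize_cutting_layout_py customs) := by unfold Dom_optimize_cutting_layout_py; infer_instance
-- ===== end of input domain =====

-- B computes the grouping in staged passes (cut positions first, then slices between
-- consecutive cuts) instead of A's stateful accumulating loop; equal return value proved
-- on all inputs where A returns (Pre_ excludes KeyError inputs).

-- Shared access helpers (both Pythons evaluate customs[i]['height'] / ['width'] the same way;
-- i is always an in-range index from range(len(customs)) and under Pre_ the key is present,
-- so the getD defaults are never reached — the helpers are exact there).
def pvH (customs : List (List (String × Int))) (i : Int) : Int :=
  ((((PySem.List.pyGet? customs i).getD []).lookup "height").getD 0)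
def pvW (customs : List (List (String × Int))) (i : Int) : Int :=
  ((((PySem.List.pyGet? customs i).getD []).lookup "width").getD 0)

-- ===== PORT A =====
-- the body of A's for-loop: state = (rows, current_row, current_row_height)
def pvStepA (f : Int → Int) (st : List (List Int) × List Int × Option Int) (idx : Int) :
    List (List Int) × List Int × Option Int :=
  let piece_height := f idx
  match st.2.2 with
  | none => (st.1, st.2.1 ++ [idx], some piece_height)
  | some h =>
    if |piece_height - h| ≤ 50 then (st.1, st.2.1 ++ [idx], some piece_height)
    else ((if st.2.1 = [] then st.1 else st.1 ++ [st.2.1]), [idx], some piece_height)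

def optimize_cutting_layout_py (customs : List (List (String × Int))) : List (List Int) :=
  if customs = [] then []
  else
    let sorted_indices :=
      PySem.List.sorted2 (PySem.List.pyRange 0 customs.length 1)
        (fun i => -(pvH customs i)) (fun i => -(pvW customs i))
    let st := sorted_indices.foldl (pvStepA (fun i => pvH customs i)) ([], [], none)
    st.1 ++ (if st.2.1 = [] then [] else [st.2.1])

-- ===== PORT B =====
-- the comprehension's condition: abs(hs[i] - hs[i-1]) > 50  (i always in range in B)
def pvBreak (hs : List Int) (i : Int) : Bool :=
  decide (50 < |(PySem.List.pyGet? hs i).getD 0 - (PySem.List.pyGet? hs (i - 1)).getD 0|)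

-- the final comprehension: [order[a:b] for a, b in zip(cuts, cuts[1:]) if a < b]
def pvPairsRows (order : List Int) (cuts : List Int) : List (List Int) :=
  (cuts.zip cuts.tail).filterMap
    (fun p => if p.1 < p.2 then some (PySem.List.slice order (some p.1) (some p.2)) else none)

def optimize_cutting_layout_py_alt (customs : List (List (String × Int))) : List (List Int) :=
  let n : Int := customs.length
  let order :=
    PySem.List.sorted2 (PySem.List.pyRange 0 n 1)
      (fun i => -(pvH customs i)) (fun i => -(pvW customs i))
  let hs := order.map (fun i => pvH customs i)
  let cuts := ((0 : Int) :: (PySem.List.pyRange 1 n 1).filter (pvBreak hs)) ++ [n]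
  pvPairsRows order cuts

-- ===== PRECONDITION & SPEC =====
-- Pre_: every piece dict has both the 'height' and the 'width' key; elsewhere A raises KeyError.
def Pre_optimize_cutting_layout_py (customs : List (List (String × Int))) : Prop :=
  ∀ d ∈ customs, (d.lookup "height").isSome ∧ (d.lookup "width").isSome
instance (customs : List (List (String × Int))) : Decidable (Pre_optimize_cutting_layout_py customs) := by
  unfold Pre_optimize_cutting_layout_py; infer_instance

def pvWitness_optimize_cutting_layout_py : (List (List (String × Int))) :=
  [[("height", 100), ("width", 40)], [("height", 160), ("width", 20)], [("height", 130), ("width", 30)]]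

def Spec_optimize_cutting_layout_py (customs : List (List (String × Int))) (out : List (List Int)) : Prop := out = optimize_cutting_layout_py_alt customs
instance (customs : List (List (String × Int))) (out : List (List Int)) : Decidable (Spec_optimize_cutting_layout_py customs out) := by unfold Spec_optimize_cutting_layout_py; infer_instance

-- ===== CLAIM (what is proved, stated in full; the proofs are below) =====
def Claim_equal_optimize_cutting_layout_py : Prop := ∀ (customs : List (List (String × Int))), Dom_optimize_cutting_layout_py customs → Pre_optimize_cutting_layout_py customs → Spec_optimize_cutting_layout_py customs (optimize_cutting_layout_py customs)

-- ===== LEMMAS AND PROOFS =====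

-- Canonical chain-grouping both ports are proved equal to.
def pvChunkGo (f : Int → Int) (h : Int) : List Int → List Int × List Int
  | [] => ([], [])
  | y :: ys =>
    if |f y - h| ≤ 50 then
      let p := pvChunkGo f (f y) ys
      (y :: p.1, p.2)
    else ([], y :: ys)

theorem pvChunkGo_append (f : Int → Int) (h : Int) (l : List Int) :
    (pvChunkGo f h l).1 ++ (pvChunkGo f h l).2 = l := by
  induction l generalizing h with
  | nil => rfl
  | cons y ys ih =>
    simp only [pvChunkGo]
    split
    · simpa using ih (f y)
    · rfl

theorem pvChunkGo_snd_length_le (f : Int → Int) (h : Int) (l : List Int) :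
    (pvChunkGo f h l).2.length ≤ l.length := by
  have := congrArg List.length (pvChunkGo_append f h l)
  simp at this
  omega

def pvChunks (f : Int → Int) : List Int → List (List Int)
  | [] => []
  | x :: xs =>
    let p := pvChunkGo f (f x) xs
    (x :: p.1) :: pvChunks f p.2
  termination_by l => l.length
  decreasing_by
    have := pvChunkGo_snd_length_le f (f x) xs
    simp
    omega

-- A's loop, started with a nonempty current row, flushes to exactly the chain grouping.
theorem pvLoopA (f : Int → Int) (l : List Int) (rows : List (List Int)) (cur : List Int)
    (hcur : cur ≠ []) (h : Int) :
    (let st := l.foldl (pvStepA f) (rows, cur, some h)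
     st.1 ++ (if st.2.1 = [] then [] else [st.2.1])) =
    rows ++ (cur ++ (pvChunkGo f h l).1) :: pvChunks f (pvChunkGo f h l).2 := by
  induction l generalizing rows cur h with
  | nil => simp [pvChunkGo, pvChunks, hcur]
  | cons y ys ih =>
    simp only [List.foldl_cons, pvStepA, pvChunkGo]
    by_cases hc : |f y - h| ≤ 50
    · simp only [hc, if_pos]
      have := ih rows (cur ++ [y]) (by simp) (f y)
      simp only [this]
      simp
    · simp only [hc, if_false, hcur]
      have := ih (rows ++ [cur]) [y] (by simp) (f y)
      simp only [this]
      simp [pvChunks]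

-- A's whole fold-and-flush equals the chain grouping.
theorem pvA_eq_chunks (f : Int → Int) (l : List Int) :
    (let st := l.foldl (pvStepA f) ([], [], none)
     st.1 ++ (if st.2.1 = [] then [] else [st.2.1])) = pvChunks f l := by
  cases l with
  | nil => simp [pvChunks]
  | cons x xs =>
    simp only [List.foldl_cons, pvStepA]
    have := pvLoopA f xs [] [x] (by simp) (f x)
    simp only [List.nil_append] at this ⊢
    rw [this]
    simp [pvChunks]

-- indexing the mapped height list through a drop fact
theorem pvGet_map_of_drop (f : Int → Int) (xs : List Int) (k : Nat) (y : Int) (ys : List Int)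
    (hd : xs.drop k = y :: ys) :
    (PySem.List.pyGet? (xs.map f) ((k : Nat) : Int)).getD 0 = f y := by
  have h1 : xs[k]? = some y := by
    rw [← List.head?_drop, hd]
    rfl
  have h2 : (xs.map f)[k]? = some (f y) := by
    simp [List.getElem?_map, h1]
  simp [PySem.List.pyGet?_natCast, h2]

-- B's break-position filter, characterised against the chain grouping: the first break
-- at or after position k sits exactly one past the end of the chain starting at k-1.
theorem pvBreaks_spec (f : Int → Int) (l : List Int) (k : Nat) (prev : Int) (rest : List Int)
    (hk : 1 ≤ k) (hd : l.drop (k - 1) = prev :: rest) :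
    (PySem.List.pyRange ((k : Nat) : Int) ((l.length : Nat) : Int) 1).filter (pvBreak (l.map f)) =
    (if k + (pvChunkGo f (f prev) rest).1.length < l.length then
       (((k + (pvChunkGo f (f prev) rest).1.length : Nat) : Int)) ::
         (PySem.List.pyRange (((k + (pvChunkGo f (f prev) rest).1.length + 1 : Nat)) : Int)
           ((l.length : Nat) : Int) 1).filter (pvBreak (l.map f))
     else []) := by
  induction rest generalizing k prev with
  | nil =>
    have hlen : l.length = k := by
      have := congrArg List.length hd
      simp [List.length_drop] at this
      omega
    rw [PySem.List.pyRange_one_eq_nil (by omega)]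
    simp [pvChunkGo, hlen]
  | cons y ys ih =>
    have hlen : k < l.length := by
      have := congrArg List.length hd
      simp [List.length_drop] at this
      omega
    have hdk : l.drop k = y :: ys := by
      have h1 : l.drop ((k - 1) + 1) = (l.drop (k - 1)).tail := by
        rw [← List.drop_drop]; simp
      rw [show (k - 1) + 1 = k by omega] at h1
      rw [h1, hd]; rfl
    have hgk : (PySem.List.pyGet? (l.map f) ((k : Nat) : Int)).getD 0 = f y :=
      pvGet_map_of_drop f l k y ys hdk
    have hgk1 : (PySem.List.pyGet? (l.map f) (((k - 1 : Nat)) : Int)).getD 0 = f prev :=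
      pvGet_map_of_drop f l (k - 1) prev (y :: ys) hd
    have hcast : ((k : Nat) : Int) - 1 = (((k - 1 : Nat)) : Int) := by omega
    have hbr : pvBreak (l.map f) ((k : Nat) : Int) = decide (50 < |f y - f prev|) := by
      unfold pvBreak
      rw [hcast, hgk, hgk1]
    rw [PySem.List.pyRange_one_cons (by exact_mod_cast hlen)]
    rw [List.filter_cons]
    by_cases hc : |f y - f prev| ≤ 50
    · have : pvBreak (l.map f) ((k : Nat) : Int) = false := by
        rw [hbr]; simp; omega
      rw [this]
      simp only [Bool.false_eq_true, if_false]
      have hcast2 : ((k : Nat) : Int) + 1 = (((k + 1 : Nat)) : Int) := by omega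
      rw [hcast2]
      have := ih (k + 1) y (by omega) (by simpa using hdk)
      rw [this]
      simp only [pvChunkGo, if_pos hc, List.length_cons]
      have e : k + 1 + (pvChunkGo f (f y) ys).1.length =
          k + ((pvChunkGo f (f y) ys).1.length + 1) := by omega
      rw [e]
    · have : pvBreak (l.map f) ((k : Nat) : Int) = true := by
        rw [hbr]; simp; omega
      rw [this]
      simp only [if_true]
      simp only [pvChunkGo, if_neg hc, List.length_nil, Nat.add_zero]
      rw [if_pos hlen]
      have e : ((k : Nat) : Int) + 1 = (((k + 1 : Nat)) : Int) := by omega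
      rw [e]
  
-- The zip-with-tail slicing of the cut list reproduces the chain grouping of the suffix.
theorem pvB_spec (f : Int → Int) (l : List Int) (m : Nat) (i : Nat)
    (hm : l.length - i ≤ m) (hi : i < l.length) :
    pvPairsRows l (((i : Nat) : Int) ::
        ((PySem.List.pyRange (((i + 1 : Nat)) : Int) ((l.length : Nat) : Int) 1).filter
            (pvBreak (l.map f)) ++ [((l.length : Nat) : Int)])) =
    pvChunks f (l.drop i) := by
  induction m generalizing i with
  | zero => omega
  | succ m ih =>
    obtain ⟨x, xs, hd⟩ : ∃ x xs, l.drop i = x :: xs := by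
      cases h : l.drop i with
      | nil =>
        have := congrArg List.length h
        simp [List.length_drop] at this
        omega
      | cons a b => exact ⟨a, b, rfl⟩
    have hbr := pvBreaks_spec f l (i + 1) x xs (by omega) (by simpa using hd)
    set g := (pvChunkGo f (f x) xs).1 with hg
    set r := (pvChunkGo f (f x) xs).2 with hr
    have happ : g ++ r = xs := pvChunkGo_append f (f x) xs
    have hglen : g.length ≤ xs.length := by
      have := congrArg List.length happ
      simp at this
      omega
    have hxslen : xs.length = l.length - i - 1 := by
      have := congrArg List.length hd
      simp [List.length_drop] at this
      omega
    have htake : xs.take g.length = g := by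
      rw [← happ]; exact List.take_left
    have hdropg : xs.drop g.length = r := by
      rw [← happ]; exact List.drop_left
    rw [hbr]
    by_cases hlt : i + 1 + g.length < l.length
    · rw [if_pos hlt]
      set j := i + 1 + g.length with hj
      -- cuts = i :: j :: (tailcuts); first pair gives the chunk, the rest recurses at j
      have hslice : PySem.List.slice l (some ((i : Nat) : Int)) (some ((j : Nat) : Int)) = x :: g := by
        rw [PySem.List.slice_natCast, hd]
        rw [show j - i = g.length + 1 by omega]
        simp [htake]
      have hdropj : l.drop j = r := by
        have h1 : l.drop j = (l.drop i).drop (1 + g.length) := by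
          rw [List.drop_drop]; congr 1; omega
        rw [h1, hd, show 1 + g.length = g.length + 1 from by omega]
        simpa using hdropg
      have hjlt : j < l.length := hlt
      have ihs := ih j (by omega) hjlt
      unfold pvPairsRows at ihs ⊢
      simp only [List.cons_append, List.tail_cons, List.zip_cons_cons, List.filterMap_cons]
      rw [if_pos (by exact_mod_cast (by omega : i < j))]
      simp only [hslice]
      simp only [List.tail_cons] at ihs
      rw [ihs, hdropj, hd]
      conv_rhs => rw [pvChunks]
    · rw [if_neg hlt]
      -- the chain runs to the end: g = xs, r = [], cuts = [i, n]
      have hgl : g.length = xs.length := by omega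
      have hrnil : r = [] := by
        have := congrArg List.length happ
        simp at this
        have : r.length = 0 := by omega
        exact List.eq_nil_of_length_eq_zero this
      have hgxs : g = xs := by
        rw [← htake, hgl, List.take_length]
      have hslice : PySem.List.slice l (some ((i : Nat) : Int)) (some ((l.length : Nat) : Int)) = x :: xs := by
        rw [PySem.List.slice_natCast, hd]
        rw [show l.length - i = xs.length + 1 by omega]
        simp
      unfold pvPairsRows
      simp only [List.nil_append, List.tail_cons, List.zip_cons_cons, List.zip_nil_right,
        List.filterMap_cons, List.filterMap_nil]
      rw [if_pos (by exact_mod_cast hi)]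
      simp only [hslice]
      rw [hd]
      conv_rhs => rw [pvChunks]
      simp [← hg, ← hr, hrnil, hgxs, pvChunks]

-- ===== VERDICT (by name: the statement is the Claim_ definition above) =====
theorem optimize_cutting_layout_py_spec : Claim_equal_optimize_cutting_layout_py := by
  intro customs _hdom _hpre
  unfold Spec_optimize_cutting_layout_py optimize_cutting_layout_py optimize_cutting_layout_py_alt
  by_cases hc : customs = []
  · subst hc
    decide
  · rw [if_neg hc]
    set f := fun i => pvH customs i with hf
    set order := PySem.List.sorted2 (PySem.List.pyRange 0 customs.length 1)
      (fun i => -(pvH customs i)) (fun i => -(pvW customs i)) with horder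
    have hA := pvA_eq_chunks f order
    have hn : order.length = customs.length := by
      rw [horder, (PySem.List.sorted2_perm _ _ _ false).length_eq,
        PySem.List.length_pyRange_one]
      simp
    have hpos : 0 < order.length := by
      rw [hn]
      cases customs with
      | nil => exact absurd rfl hc
      | cons a b => simp
    have hB := pvB_spec f order order.length 0 (by omega) hpos
    simp only [List.drop_zero] at hB
    rw [hn] at hB
    norm_num at hB
    rw [hA]
    simp only [List.cons_append]
    exact hB.symm
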